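-- pv_equiv track=rewrite | github.com/cheadlee10/workspace-john | _tmp_pick_wave86.py | split_json_objects
-- ===== SOURCE A (Python) =====
-- def split_json_objects(s):
--     objs=[]
--     depth=0
--     start=None
--     in_str=False
--     esc=False
--     for i,ch in enumerate(s):
--         if in_str:
--             if esc:
--                 esc=False
--             elif ch=='\\':
--                 esc=True
--             elif ch=='"':
--                 in_str=False
--             continue
--         else:
--             if ch=='"':
--                 in_str=True
--                 continue
--             if ch=='{':
--                 if depth==0:
--                     start=i
--                 depth+=1
--             elif ch=='}' and depth>0:
--                 depth-=1
--                 if depth==0 and start is not None: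
--                     objs.append(s[start:i+1])
--                     start=None
--     return objs
-- ===== SOURCE B (Python) =====
-- def split_json_objects(s):
--     # pass 1: tokenize — skip over string literals (backslash escapes a char;
--     # an unterminated string swallows the rest) and collect the brace tokens
--     n = len(s)
--     toks = []
--     i = 0
--     while i < n:
--         c = s[i]
--         if c == '"':
--             i += 1
--             while i < n:
--                 if s[i] == '\\':
--                     i += 2
--                 elif s[i] == '"':
--                     i += 1
--                     break
--                 else:
--                     i += 1
--         else:
--             if c == '{' or c == '}':
--                 toks.append((i, c))
--             i += 1
--     # pass 2: depth scan over the brace tokens only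
--     objs = []
--     depth = 0
--     start = None
--     for i, c in toks:
--         if c == '{':
--             if depth == 0:
--                 start = i
--             depth += 1
--         elif depth > 0:
--             depth -= 1
--             if depth == 0 and start is not None:
--                 objs.append(s[start:i + 1])
--                 start = None
--     return objs
-- ===== Notes on version B (the rewrite author's own statement) =====
-- stated objective: alternative
-- what changed: A's single five-variable character state machine is replaced by a tokenize-then-scan decomposition: pass 1 is an index-jumping scanner that skips whole string literals (backslash consumes the next char, an unterminated string swallows the rest) and emits only the (index, brace) tokens, pass 2 depth-scans that token list to collect top-level objects.
import Mathlib
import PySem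

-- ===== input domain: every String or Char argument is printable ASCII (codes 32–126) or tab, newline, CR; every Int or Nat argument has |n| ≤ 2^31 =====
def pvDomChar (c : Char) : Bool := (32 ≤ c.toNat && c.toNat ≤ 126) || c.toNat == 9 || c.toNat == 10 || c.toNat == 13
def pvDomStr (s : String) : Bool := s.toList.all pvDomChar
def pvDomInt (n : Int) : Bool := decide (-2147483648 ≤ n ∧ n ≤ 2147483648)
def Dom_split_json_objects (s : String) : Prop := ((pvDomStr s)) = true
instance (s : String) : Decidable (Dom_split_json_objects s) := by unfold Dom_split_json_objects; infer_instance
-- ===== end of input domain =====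

-- B replaces A's single five-variable state machine by a tokenize-then-scan decomposition:
-- pass 1 skips string literals wholesale and keeps only the brace tokens, pass 2 depth-scans them.

-- ===== PORT A =====
-- A's single loop: state (objs, depth, start, in_str, esc), index i over enumerate(s).
def pvLoopA (s : String) : List Char → Nat → List String → Int → Option Nat → Bool → Bool → List String
  | [], _, objs, _, _, _, _ => objs
  | ch :: rest, i, objs, depth, start, in_str, esc =>
    if in_str then
      if esc then pvLoopA s rest (i+1) objs depth start in_str false
      else if ch = '\\' then pvLoopA s rest (i+1) objs depth start in_str true
      else if ch = '"' then pvLoopA s rest (i+1) objs depth start false esc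
      else pvLoopA s rest (i+1) objs depth start in_str esc
    else
      if ch = '"' then pvLoopA s rest (i+1) objs depth start true esc
      else if ch = '{' then
        pvLoopA s rest (i+1) objs (depth+1) (if depth = 0 then some i else start) in_str esc
      else if ch = '}' ∧ depth > 0 then
        if depth - 1 = 0 ∧ start.isSome then
          pvLoopA s rest (i+1)
            (objs ++ [PySem.Str.slice s (some (start.getD 0 : Int)) (some ((i : Int) + 1))])
            (depth - 1) none in_str esc
        else pvLoopA s rest (i+1) objs (depth - 1) start in_str esc
      else pvLoopA s rest (i+1) objs depth start in_str esc

def split_json_objects (s : String) : List String :=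
  pvLoopA s s.toList 0 [] 0 none false false

-- ===== PORT B =====
-- B's inner while loop: skip past a string literal ('\\' consumes the next char,
-- an unterminated string swallows the rest); returns the remaining chars and the next index.
def pvSkipStr : List Char → Nat → List Char × Nat
  | [], i => ([], i)
  | c :: rest, i =>
    if c = '\\' then
      match rest with
      | [] => ([], i + 2)
      | _ :: rest2 => pvSkipStr rest2 (i + 2)
    else if c = '"' then (rest, i + 1)
    else pvSkipStr rest (i + 1)

-- needed by pvToks's termination (the tokenizer recurses on pvSkipStr's remainder)
theorem pvSkipStr_fst_length_le' : ∀ (N : Nat) (l : List Char), l.length ≤ N →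
    ∀ (i : Nat), (pvSkipStr l i).1.length ≤ l.length := by
  intro N
  induction N with
  | zero =>
    intro l hl i
    have : l = [] := List.eq_nil_of_length_eq_zero (Nat.le_zero.mp hl)
    subst this; rw [pvSkipStr.eq_def]
  | succ N ih =>
    intro l hl i
    match l with
    | [] => rw [pvSkipStr.eq_def]
    | c :: rest =>
      rw [pvSkipStr.eq_def]
      by_cases h1 : c = '\\'
      · simp only [h1, if_true]
        match rest with
        | [] => simp
        | x :: rest2 =>
          have h := ih rest2 (by simp at hl; omega) (i + 2)
          simp; omega
      · by_cases h2 : c = '"'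
        · simp [h2]
        · have h := ih rest (by simp at hl; omega) (i + 1)
          simp [h1, h2]; omega

theorem pvSkipStr_fst_length_le (l : List Char) (i : Nat) : (pvSkipStr l i).1.length ≤ l.length :=
  pvSkipStr_fst_length_le' l.length l (Nat.le_refl _) i

-- B pass 1: the outer while loop — collect the (index, char) brace tokens outside string literals.
def pvToks : List Char → Nat → List (Nat × Char)
  | [], _ => []
  | c :: rest, i =>
    if c = '"' then
      pvToks (pvSkipStr rest (i + 1)).1 (pvSkipStr rest (i + 1)).2
    else if c = '{' ∨ c = '}' then (i, c) :: pvToks rest (i + 1)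
    else pvToks rest (i + 1)
termination_by l => l.length
decreasing_by
  · exact Nat.lt_succ_of_le (pvSkipStr_fst_length_le rest (i + 1))
  · simp
  · simp

-- B pass 2: depth scan over the brace tokens only.
def pvLoopB2 (s : String) : List (Nat × Char) → List String → Int → Option Nat → List String
  | [], objs, _, _ => objs
  | (i, c) :: rest, objs, depth, start =>
    if c = '{' then pvLoopB2 s rest objs (depth+1) (if depth = 0 then some i else start)
    else if depth > 0 then
      if depth - 1 = 0 ∧ start.isSome then
        pvLoopB2 s rest
          (objs ++ [PySem.Str.slice s (some (start.getD 0 : Int)) (some ((i : Int) + 1))])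
          (depth - 1) none
      else pvLoopB2 s rest objs (depth - 1) start
    else pvLoopB2 s rest objs depth start

def split_json_objects_alt (s : String) : List String :=
  pvLoopB2 s (pvToks s.toList 0) [] 0 none

-- ===== PRECONDITION & SPEC =====
def Spec_split_json_objects (s : String) (out : List String) : Prop := out = split_json_objects_alt s
instance (s : String) (out : List String) : Decidable (Spec_split_json_objects s out) := by unfold Spec_split_json_objects; infer_instance

-- ===== CLAIM (what is proved, stated in full; the proofs are below) =====
def Claim_equal_split_json_objects : Prop := ∀ (s : String), Dom_split_json_objects s → Spec_split_json_objects s (split_json_objects s)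

-- ===== LEMMAS AND PROOFS =====
-- unfolding equations for the two well-founded definitions (simp cannot use them directly)
theorem pvSkipStr_nil (i : Nat) : pvSkipStr [] i = ([], i) := by rw [pvSkipStr.eq_def]
theorem pvSkipStr_bs_nil (i : Nat) : pvSkipStr ['\\'] i = ([], i + 2) := by
  rw [pvSkipStr.eq_def]; simp
theorem pvSkipStr_bs_cons (x : Char) (rest2 : List Char) (i : Nat) :
    pvSkipStr ('\\' :: x :: rest2) i = pvSkipStr rest2 (i + 2) := by
  rw [pvSkipStr.eq_def]; simp
theorem pvSkipStr_quote (rest : List Char) (i : Nat) : pvSkipStr ('"' :: rest) i = (rest, i + 1) := by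
  rw [pvSkipStr.eq_def]; simp
theorem pvSkipStr_other {c : Char} (rest : List Char) (i : Nat) (h1 : ¬ c = '\\') (h2 : ¬ c = '"') :
    pvSkipStr (c :: rest) i = pvSkipStr rest (i + 1) := by
  rw [pvSkipStr.eq_def]; simp [h1, h2]

theorem pvToks_nil (i : Nat) : pvToks [] i = [] := by rw [pvToks.eq_def]
theorem pvToks_quote (rest : List Char) (i : Nat) :
    pvToks ('"' :: rest) i = pvToks (pvSkipStr rest (i + 1)).1 (pvSkipStr rest (i + 1)).2 := by
  rw [pvToks.eq_def]; simp
theorem pvToks_brace {c : Char} (rest : List Char) (i : Nat) (h2 : ¬ c = '"')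
    (h : c = '{' ∨ c = '}') : pvToks (c :: rest) i = (i, c) :: pvToks rest (i + 1) := by
  rw [pvToks.eq_def]; simp [h2, h]
theorem pvToks_other {c : Char} (rest : List Char) (i : Nat) (h2 : ¬ c = '"')
    (h3 : ¬ c = '{') (h4 : ¬ c = '}') : pvToks (c :: rest) i = pvToks rest (i + 1) := by
  rw [pvToks.eq_def]; simp [h2, h3, h4]

-- A's in-string scanning (in_str = true, esc = false) is exactly B's pvSkipStr skip.
theorem pvLoopA_skip (s : String) : ∀ (N : Nat) (l : List Char), l.length ≤ N →
    ∀ (i : Nat) (objs : List String) (depth : Int) (start : Option Nat),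
    pvLoopA s l i objs depth start true false
      = pvLoopA s (pvSkipStr l i).1 (pvSkipStr l i).2 objs depth start false false := by
  intro N
  induction N with
  | zero =>
    intro l hl i objs depth start
    have : l = [] := List.eq_nil_of_length_eq_zero (Nat.le_zero.mp hl)
    subst this; simp [pvLoopA, pvSkipStr_nil]
  | succ N ih =>
    intro l hl i objs depth start
    match l with
    | [] => simp [pvLoopA, pvSkipStr_nil]
    | c :: rest =>
      by_cases h1 : c = '\\'
      · subst h1
        match rest with
        | [] => simp [pvLoopA, pvSkipStr_bs_nil]
        | x :: rest2 =>
          have hr2 : rest2.length ≤ N := by simp at hl; omega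
          rw [pvSkipStr_bs_cons, ← ih rest2 hr2 (i + 2) objs depth start]
          simp [pvLoopA]
      · by_cases h2 : c = '"'
        · subst h2; rw [pvSkipStr_quote]; simp [pvLoopA, h1]
        · have hr : rest.length ≤ N := by simp at hl; omega
          rw [pvSkipStr_other rest i h1 h2, ← ih rest hr (i + 1) objs depth start]
          simp [pvLoopA, h1, h2]

-- Core invariant: A's fused loop (outside a string) equals B's depth scan over B's tokens.
theorem pvLoopA_eq_toks (s : String) : ∀ (N : Nat) (l : List Char), l.length ≤ N →
    ∀ (i : Nat) (objs : List String) (depth : Int) (start : Option Nat),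
    pvLoopA s l i objs depth start false false
      = pvLoopB2 s (pvToks l i) objs depth start := by
  intro N
  induction N with
  | zero =>
    intro l hl i objs depth start
    have : l = [] := List.eq_nil_of_length_eq_zero (Nat.le_zero.mp hl)
    subst this; simp [pvLoopA, pvToks_nil, pvLoopB2]
  | succ N ih =>
    intro l hl i objs depth start
    match l with
    | [] => simp [pvLoopA, pvToks_nil, pvLoopB2]
    | c :: rest =>
      have hr : rest.length ≤ N := by simp at hl; omega
      by_cases h2 : c = '"'
      · subst h2
        have hskip : (pvSkipStr rest (i + 1)).1.length ≤ N :=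
          le_trans (pvSkipStr_fst_length_le rest (i + 1)) hr
        rw [pvToks_quote]
        have hA : pvLoopA s ('"' :: rest) i objs depth start false false
            = pvLoopA s rest (i + 1) objs depth start true false := by simp [pvLoopA]
        rw [hA, pvLoopA_skip s N rest hr (i + 1) objs depth start]
        exact ih _ hskip _ objs depth start
      · by_cases h3 : c = '{'
        · subst h3
          rw [pvToks_brace rest i h2 (Or.inl rfl)]
          simp [pvLoopA, pvLoopB2, h2, ih rest hr]
        · by_cases h4 : c = '}'
          · subst h4
            rw [pvToks_brace rest i h2 (Or.inr rfl)]
            by_cases h5 : depth > 0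
            · by_cases h6 : depth - 1 = 0 ∧ start.isSome
              · simp [pvLoopA, pvLoopB2, h2, h3, h5, h6, ih rest hr]
              · simp [pvLoopA, pvLoopB2, h2, h3, h5, h6, ih rest hr]
            · simp [pvLoopA, pvLoopB2, h2, h3, h5, ih rest hr]
          · rw [pvToks_other rest i h2 h3 h4]
            simp [pvLoopA, h2, h3, h4, ih rest hr]

-- ===== VERDICT (by name: the statement is the Claim_ definition above) =====
theorem split_json_objects_spec : Claim_equal_split_json_objects := by
  intro s _
  unfold Spec_split_json_objects split_json_objects split_json_objects_alt
  exact pvLoopA_eq_toks s s.toList.length s.toList (Nat.le_refl _) 0 [] 0 none
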